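-- pv_equiv track=rewrite | github.com/Odden69/Nonogram_game | game_board.py | calc_header
-- ===== SOURCE A (Python) =====
-- from math import ceil
--
-- def board_element(i, k, direction, game_pattern):
--     """
--     Support function for calc_header function.
--     Determines the order of iteration through the board list,
--     depending on header direction.
--     """
--     if direction == 'vertical':
--         return game_pattern[-i][k]
--     else:
--         return game_pattern[k][-i]
--
-- def calc_header(size, direction, game_pattern):
--     """
--     Calculates a header as a list of lists from values in the game_pattern.
--     """
--     header = [[0 for i in range(ceil(size/2))] for j in range(size)]
--     i = 1
--     j = 1
--     k = 0
--     while k < size: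
--         cont = False
--         while i <= size:
--             if board_element(i, k, direction, game_pattern) == '1':
--                 cont = True
--                 header[k][-j] += 1
--                 i += 1
--             elif cont:
--                 j += 1
--                 i += 1
--                 cont = False
--             else:
--                 i += 1
--         k += 1
--         i = 1
--         j = 1
--     return header
-- ===== SOURCE B (Python) =====
-- def calc_header(size, direction, game_pattern):
--     """
--     Calculates a header as a list of lists from values in the game_pattern.
--     """
--     width = -(-size // 2)  # ceil(size / 2)
--     header = []
--     for k in range(size):
--         if direction == 'vertical':
--             line = [row[k] for row in game_pattern[-size:]]
--         else:
--             line = game_pattern[k][-size:]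
--         runs = []
--         count = 0
--         for cell in line:
--             if cell == '1':
--                 count += 1
--             elif count:
--                 runs.append(count)
--                 count = 0
--         if count:
--             runs.append(count)
--         header.append([0] * (width - len(runs)) + runs)
--     return header
-- ===== Notes on version B (the rewrite author's own statement) =====
-- stated objective: simpler
-- what changed: A fills a preallocated zero matrix by scanning each line right-to-left with negative indices and a cross-loop accumulator writing counts at header[k][-j]; B instead extracts each line in natural order, computes its run-length list by a plain left-to-right grouping fold, and right-aligns it with [0]*(width-len(runs))+runs.
import Mathlib
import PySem

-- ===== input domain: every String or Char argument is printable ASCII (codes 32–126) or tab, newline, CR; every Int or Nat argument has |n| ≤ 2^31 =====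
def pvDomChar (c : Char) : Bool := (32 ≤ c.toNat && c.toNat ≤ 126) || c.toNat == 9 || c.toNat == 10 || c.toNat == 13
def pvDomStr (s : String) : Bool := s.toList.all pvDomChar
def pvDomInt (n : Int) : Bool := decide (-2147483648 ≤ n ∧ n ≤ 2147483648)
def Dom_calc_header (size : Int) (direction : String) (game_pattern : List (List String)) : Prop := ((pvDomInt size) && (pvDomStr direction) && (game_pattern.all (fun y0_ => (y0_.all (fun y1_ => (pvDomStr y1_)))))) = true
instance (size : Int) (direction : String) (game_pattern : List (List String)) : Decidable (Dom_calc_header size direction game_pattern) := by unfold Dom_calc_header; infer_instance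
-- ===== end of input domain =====

-- B replaces A's right-to-left negative-index accumulator scan by 'extract line, group runs, right-align'; objective: simpler.

-- ===== PORT A =====
def board_element (i k : Int) (direction : String) (game_pattern : List (List String)) : Option String :=
  if direction == "vertical" then
    (PySem.List.pyGet? game_pattern (-i)).bind (fun row => PySem.List.pyGet? row k)
  else
    (PySem.List.pyGet? game_pattern k).bind (fun row => PySem.List.pyGet? row (-i))

-- header[k][-j] += 1 (Python raises on an out-of-range index; such inputs are outside Pre_, the port no-ops there)
def bumpRow (row : List Int) (j : Int) : List Int :=
  match PySem.List.pyGet? row (-j) with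
  | some v => PySem.List.pySetD row (-j) (v + 1)
  | none => row

def bumpAt (header : List (List Int)) (k j : Int) : List (List Int) :=
  match PySem.List.pyGet? header k with
  | some row => PySem.List.pySetD header k (bumpRow row j)
  | none => header

def calcInnerA (fuel : Nat) (i j : Int) (cont : Bool) (k size : Int) (direction : String)
    (game_pattern : List (List String)) (header : List (List Int)) : List (List Int) :=
  match fuel with
  | 0 => header
  | fuel' + 1 =>
    if i ≤ size then
      if board_element i k direction game_pattern == some "1" then
        calcInnerA fuel' (i+1) j true k size direction game_pattern (bumpAt header k j)
      else if cont then
        calcInnerA fuel' (i+1) (j+1) false k size direction game_pattern header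
      else
        calcInnerA fuel' (i+1) j cont k size direction game_pattern header
    else header

def calcOuterA (fuel : Nat) (k size : Int) (direction : String)
    (game_pattern : List (List String)) (header : List (List Int)) : List (List Int) :=
  match fuel with
  | 0 => header
  | fuel' + 1 =>
    if k < size then
      calcOuterA fuel' (k+1) size direction game_pattern
        (calcInnerA size.toNat 1 1 false k size direction game_pattern header)
    else header

def calc_header (size : Int) (direction : String) (game_pattern : List (List String)) : List (List Int) :=
  let header := List.replicate size.toNat (List.replicate (PySem.Int.floordiv (size + 1) 2).toNat 0)
  calcOuterA size.toNat 0 size direction game_pattern header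

-- ===== PORT B =====
def stepRun (s : List Int × Int) (cell : String) : List Int × Int :=
  if cell == "1" then (s.1, s.2 + 1)
  else if s.2 ≠ 0 then (s.1 ++ [s.2], 0)
  else (s.1, 0)

def calcRuns (line : List String) : List Int :=
  let s := line.foldl stepRun ([], 0)
  if s.2 ≠ 0 then s.1 ++ [s.2] else s.1

def lineOf (size k : Int) (direction : String) (game_pattern : List (List String)) : List String :=
  if direction == "vertical" then
    (PySem.List.slice game_pattern (some (-size)) none).map (fun row => PySem.List.pyGetD row k "")
  else
    PySem.List.slice (PySem.List.pyGetD game_pattern k []) (some (-size)) none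

def calc_header_alt (size : Int) (direction : String) (game_pattern : List (List String)) : List (List Int) :=
  let width := PySem.Int.floordiv (size + 1) 2
  (PySem.List.pyRange 0 size 1).map (fun k =>
    let runs := calcRuns (lineOf size k direction game_pattern)
    List.replicate (width - runs.length).toNat 0 ++ runs)

-- ===== PRECONDITION & SPEC =====
-- Pre_ = exactly the inputs where A returns: every line A actually indexes (the first `size`
-- rows horizontally, the last `size` rows vertically, each needing `size` entries) is long enough.
def Pre_calc_header (size : Int) (direction : String) (game_pattern : List (List String)) : Prop :=
  size ≤ game_pattern.length ∧
  (if direction == "vertical"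
   then ∀ r ∈ game_pattern.drop (game_pattern.length - size.toNat), size ≤ (r.length : Int)
   else ∀ r ∈ game_pattern.take size.toNat, size ≤ (r.length : Int))

instance (size : Int) (direction : String) (game_pattern : List (List String)) : Decidable (Pre_calc_header size direction game_pattern) := by
  unfold Pre_calc_header; infer_instance

def pvWitness_calc_header : Int × String × List (List String) :=
  (2, "horizontal", [["1", "0"], ["1", "1"]])

def Spec_calc_header (size : Int) (direction : String) (game_pattern : List (List String)) (out : List (List Int)) : Prop := out = calc_header_alt size direction game_pattern
instance (size : Int) (direction : String) (game_pattern : List (List String)) (out : List (List Int)) : Decidable (Spec_calc_header size direction game_pattern out) := by unfold Spec_calc_header; infer_instance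

-- ===== CLAIM (what is proved, stated in full; the proofs are below) =====
def Claim_equal_calc_header : Prop := ∀ (size : Int) (direction : String) (game_pattern : List (List String)), Dom_calc_header size direction game_pattern → Pre_calc_header size direction game_pattern → Spec_calc_header size direction game_pattern (calc_header size direction game_pattern)

-- ===== LEMMAS AND PROOFS =====

-- abstract form of A's inner loop, acting on the one header row it touches
def scanA : List String → Int → Bool → List Int → List Int
  | [], _, _, row => row
  | c :: cs, j, cont, row =>
    if c == "1" then scanA cs j true (bumpRow row j)
    else if cont then scanA cs (j+1) false row
    else scanA cs j cont row

lemma foldl_stepRun_snd_nonneg : ∀ (l : List String) (s : List Int × Int), 0 ≤ s.2 →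
    0 ≤ (l.foldl stepRun s).2 := by
  intro l
  induction l with
  | nil => intro s hs; simpa using hs
  | cons c cs ih =>
    intro s hs
    simp only [List.foldl_cons]
    apply ih
    unfold stepRun
    split_ifs <;> simp <;> omega

lemma runs_bound : ∀ (l : List String) (rs : List Int) (c : Int), 0 ≤ c →
    2 * (l.foldl stepRun (rs, c)).1.length + (if (l.foldl stepRun (rs, c)).2 ≠ 0 then 1 else 0)
      ≤ 2 * rs.length + (if c ≠ 0 then 1 else 0) + l.length := by
  intro l
  induction l with
  | nil => intro rs c hc; simp only [List.foldl_nil, List.length_nil]; split_ifs <;> omega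
  | cons x xs ih =>
    intro rs c hc
    simp only [List.foldl_cons, List.length_cons]
    by_cases hx : x == "1"
    · have := ih rs (c + 1) (by omega)
      simp only [stepRun, hx, if_true]
      have h1 : (c + 1 ≠ 0) := by omega
      simp only [h1, if_true] at this
      split_ifs at this ⊢ <;> omega
    · by_cases hc0 : c ≠ 0
      · have := ih (rs ++ [c]) 0 (le_refl 0)
        simp only [stepRun, hx, hc0, if_true, if_false, Bool.false_eq_true, List.length_append,
          List.length_singleton] at this ⊢
        split_ifs at this ⊢ <;> omega
      · have := ih rs 0 (le_refl 0)
        simp only [stepRun, hx, hc0, if_false, Bool.false_eq_true] at this ⊢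
        split_ifs at this ⊢ <;> omega

lemma calcRuns_len (l : List String) : 2 * (calcRuns l).length ≤ l.length + 1 := by
  have h := runs_bound l [] 0 (le_refl 0)
  unfold calcRuns
  simp only [List.length_nil, mul_zero, zero_add, ne_eq, decide_not] at h ⊢
  split_ifs at h ⊢ with h2 <;> simp_all <;> omega

lemma bumpRow_eq (z : Nat) (x : Int) (acc : List Int) :
    bumpRow (List.replicate z 0 ++ x :: acc) ((acc.length : Int) + 1)
      = List.replicate z 0 ++ (x + 1) :: acc := by
  have hlen : (List.replicate z 0 ++ x :: acc).length = z + (acc.length + 1) := by simp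
  have hget : PySem.List.pyGet? (List.replicate z 0 ++ x :: acc) (-((acc.length : Int) + 1)) = some x := by
    have h1 : -((acc.length : Int) + 1) = -((acc.length + 1 : Nat) : Int) := by push_cast; ring
    rw [h1, PySem.List.pyGet?_neg_natCast _ _ (by omega) (by rw [hlen]; omega), hlen]
    have hz : z + (acc.length + 1) - (acc.length + 1) = z := by omega
    rw [hz, List.getElem?_append_right (by simp)]
    simp
  unfold bumpRow
  rw [hget]
  simp only [PySem.List.pySetD, PySem.List.pySet?, PySem.List.pyIdx?, hlen]
  norm_num
  rw [if_neg (by omega), if_pos (by omega)]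
  simp only [Option.map_some, Option.getD_some]
  induction z with
  | zero => simp
  | succ n ih => simpa [List.replicate_succ] using ih

lemma scan_spec : ∀ (cs : List String),
    (∀ (z : Nat) (cur : Int) (acc : List Int),
        (cs.reverse.foldl stepRun ([], 0)).1.length ≤ z →
        scanA cs ((acc.length : Int) + 1) true (List.replicate z 0 ++ cur :: acc)
          = List.replicate (z - (cs.reverse.foldl stepRun ([], 0)).1.length) 0
              ++ (cs.reverse.foldl stepRun ([], 0)).1
              ++ ((cs.reverse.foldl stepRun ([], 0)).2 + cur) :: acc)
    ∧ (∀ (z : Nat) (acc : List Int),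
        (calcRuns cs.reverse).length ≤ z →
        scanA cs ((acc.length : Int) + 1) false (List.replicate z 0 ++ acc)
          = List.replicate (z - (calcRuns cs.reverse).length) 0 ++ calcRuns cs.reverse ++ acc) := by
  intro cs
  induction cs with
  | nil =>
    constructor
    · intro z cur acc _h
      simp [scanA, calcRuns]
    · intro z acc _h
      simp [scanA, calcRuns]
  | cons c cs ih =>
    obtain ⟨ihT, ihF⟩ := ih
    have hd : 0 ≤ (cs.reverse.foldl stepRun ([], 0)).2 :=
      foldl_stepRun_snd_nonneg _ _ (by norm_num)
    have hrev : (c :: cs).reverse = cs.reverse ++ [c] := by simp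
    have hfold : (c :: cs).reverse.foldl stepRun ([], 0)
        = stepRun (cs.reverse.foldl stepRun ([], 0)) c := by
      rw [hrev, List.foldl_append]; simp
    constructor
    · -- cont = true
      intro z cur acc h
      rw [hfold] at h ⊢
      by_cases hc : c = "1"
      · simp only [stepRun, hc, BEq.rfl, if_true] at h ⊢
        simp only [scanA, hc, BEq.rfl, if_true]
        rw [bumpRow_eq]
        rw [ihT z (cur + 1) acc h]
        have : (cs.reverse.foldl stepRun ([], 0)).2 + (cur + 1)
            = (cs.reverse.foldl stepRun ([], 0)).2 + 1 + cur := by ring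
        rw [this]
      · have hcb : (c == "1") = false := by simp [hc]
        have hfold2 : stepRun (cs.reverse.foldl stepRun ([], 0)) c = (calcRuns cs.reverse, 0) := by
          simp only [stepRun, hcb, Bool.false_eq_true, if_false]
          unfold calcRuns
          split_ifs <;> simp_all
        rw [hfold2] at h ⊢
        simp only at h ⊢
        simp only [scanA, hcb, Bool.false_eq_true, if_false, if_true]
        have hlen2 : ((acc.length : Int) + 1) + 1 = (((cur :: acc).length : Int) + 1) := by
          simp only [List.length_cons]
          push_cast
          ring
        rw [hlen2, ihF z (cur :: acc) h, zero_add]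
    · -- cont = false
      intro z acc h
      have hcr2 : calcRuns (c :: cs).reverse
          = (if ((c :: cs).reverse.foldl stepRun ([], 0)).2 ≠ 0
             then ((c :: cs).reverse.foldl stepRun ([], 0)).1 ++ [((c :: cs).reverse.foldl stepRun ([], 0)).2]
             else ((c :: cs).reverse.foldl stepRun ([], 0)).1) := rfl
      by_cases hc : c = "1"
      · -- the scanned cell starts a run: z ≥ 1 and we bump the last zero
        have hfold2 : (c :: cs).reverse.foldl stepRun ([], 0)
            = ((cs.reverse.foldl stepRun ([], 0)).1, (cs.reverse.foldl stepRun ([], 0)).2 + 1) := by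
          rw [hfold]; simp [stepRun, hc]
        have hne : (cs.reverse.foldl stepRun ([], 0)).2 + 1 ≠ 0 := by omega
        have hcrv : calcRuns (c :: cs).reverse
            = (cs.reverse.foldl stepRun ([], 0)).1 ++ [(cs.reverse.foldl stepRun ([], 0)).2 + 1] := by
          rw [hcr2, hfold2]
          simp only [ne_eq, hne, not_false_eq_true, if_true]
        rw [hcrv] at h ⊢
        simp only [List.length_append, List.length_singleton] at h
        have hz1 : 1 ≤ z := by omega
        have hsplit : List.replicate z (0 : Int) ++ acc
            = List.replicate (z - 1) 0 ++ (0 : Int) :: acc := by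
          have : z = (z - 1) + 1 := by omega
          rw [this]
          simp [List.replicate_succ', List.append_assoc]
        rw [hsplit]
        simp only [scanA, hc, BEq.rfl, if_true]
        rw [bumpRow_eq]
        simp only [zero_add]
        rw [ihT (z - 1) 1 acc (by omega)]
        have h1 : z - ((cs.reverse.foldl stepRun ([], 0)).1.length + 1)
            = z - 1 - (cs.reverse.foldl stepRun ([], 0)).1.length := by omega
        simp only [List.length_append, List.length_singleton]
        rw [h1]
        simp only [List.append_assoc, List.singleton_append]
      · have hcb : (c == "1") = false := by simp [hc]
        have hfold2 : (c :: cs).reverse.foldl stepRun ([], 0)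
            = ((if (cs.reverse.foldl stepRun ([], 0)).2 ≠ 0
                then (cs.reverse.foldl stepRun ([], 0)).1 ++ [(cs.reverse.foldl stepRun ([], 0)).2]
                else (cs.reverse.foldl stepRun ([], 0)).1), 0) := by
          rw [hfold]; simp only [stepRun, hcb, Bool.false_eq_true, if_false]
          split_ifs <;> simp_all
        have hsame : calcRuns (c :: cs).reverse = calcRuns cs.reverse := by
          rw [hcr2, hfold2]
          simp [calcRuns]
        rw [hsame] at h ⊢
        simp only [scanA, hcb, Bool.false_eq_true, if_false]
        exact ihF z acc h

lemma innerA_eq (size k : Int) (direction : String) (gp : List (List String)) (hk : 0 ≤ k) :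
    ∀ (cs : List String) (i j : Int) (cont : Bool) (header : List (List Int)),
      i + cs.length = size + 1 →
      (∀ m : Nat, m < cs.length → board_element (i + m) k direction gp = cs[m]?) →
      calcInnerA cs.length i j cont k size direction gp header =
        match PySem.List.pyGet? header k with
        | some row => PySem.List.pySetD header k (scanA cs j cont row)
        | none => header := by
  intro cs
  induction cs with
  | nil =>
    intro i j cont header _ _
    cases hg : PySem.List.pyGet? header k with
    | none => rfl
    | some row =>
      simp only [List.length_nil, calcInnerA, scanA]
      rw [PySem.List.pySetD_of_nonneg _ _ hk]
      rw [PySem.List.pyGet?_of_nonneg _ hk] at hg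
      have hlt : k.toNat < header.length := by
        by_contra hcon
        rw [List.getElem?_eq_none (by omega)] at hg
        simp at hg
      rw [List.getElem?_eq_getElem hlt] at hg
      obtain rfl : header[k.toNat] = row := Option.some.inj hg
      exact (List.set_getElem_self hlt).symm
  | cons c cs ih =>
    intro i j cont header hlen hcells
    have hi : i ≤ size := by
      simp only [List.length_cons] at hlen
      push_cast at hlen
      omega
    have hb0 : board_element i k direction gp = some c := by
      have h := hcells 0 (by simp)
      simpa using h
    have hcells' : ∀ m : Nat, m < cs.length → board_element ((i + 1) + m) k direction gp = cs[m]? := by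
      intro m hm
      have h := hcells (m + 1) (by simp only [List.length_cons]; omega)
      have harg : i + ((m + 1 : Nat) : Int) = (i + 1) + (m : Int) := by push_cast; ring
      rw [harg] at h
      simpa using h
    have hlen' : (i + 1) + (cs.length : Int) = size + 1 := by
      simp only [List.length_cons] at hlen
      push_cast at hlen ⊢
      omega
    simp only [List.length_cons, calcInnerA, hi, if_pos, hb0]
    by_cases hc : c = "1"
    · simp only [hc, BEq.rfl, Option.some.injEq, if_pos, if_true, reduceIte]
      rw [ih (i + 1) j true (bumpAt header k j) hlen' hcells']
      unfold bumpAt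
      cases hg : PySem.List.pyGet? header k with
      | none => simp [hg]
      | some row =>
        have hred : (match some row with
            | some row => PySem.List.pySetD header k (bumpRow row j)
            | none => header) = PySem.List.pySetD header k (bumpRow row j) := rfl
        rw [hred]
        rw [PySem.List.pyGet?_of_nonneg _ hk] at hg
        have hlt : k.toNat < header.length := by
          by_contra hcon
          rw [List.getElem?_eq_none (by omega)] at hg
          simp at hg
        rw [PySem.List.pySetD_of_nonneg _ _ hk]
        have hg2 : PySem.List.pyGet? (header.set k.toNat (bumpRow row j)) k = some (bumpRow row j) := by
          rw [PySem.List.pyGet?_of_nonneg _ hk]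
          exact List.getElem?_set_self (by simpa using hlt)
        rw [hg2]
        show PySem.List.pySetD (header.set k.toNat (bumpRow row j)) k (scanA cs j true (bumpRow row j))
            = PySem.List.pySetD header k (scanA ("1" :: cs) j cont row)
        rw [PySem.List.pySetD_of_nonneg _ _ hk, List.set_set]
        have hsc : scanA ("1" :: cs) j cont row = scanA cs j true (bumpRow row j) := by
          simp [scanA]
        rw [hsc]
        rw [PySem.List.pySetD_of_nonneg _ _ hk]
    · have hcb : ((c : String) == "1") = false := by simp [hc]
      have hcb2 : (some c == some ("1" : String)) = false := by simp [hc]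
      simp only [hcb2, Bool.false_eq_true, if_false]
      cases cont with
      | true =>
        simp only [if_true]
        rw [ih (i + 1) (j + 1) false header hlen' hcells']
        cases PySem.List.pyGet? header k with
        | none => rfl
        | some row => simp [scanA, hcb]
      | false =>
        simp only [Bool.false_eq_true, if_false]
        rw [ih (i + 1) j false header hlen' hcells']
        cases PySem.List.pyGet? header k with
        | none => rfl
        | some row => simp [scanA, hcb]

lemma cells_spec (size k : Int) (direction : String) (gp : List (List String))
    (hPre : Pre_calc_header size direction gp) (hk0 : 0 ≤ k) (hk : k < size) :
    (lineOf size k direction gp).length = size.toNat ∧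
    ∀ m : Nat, m < size.toNat →
      board_element (1 + (m : Int)) k direction gp = (lineOf size k direction gp).reverse[m]? := by
  obtain ⟨hglen, hcond⟩ := hPre
  have hsz : size = (size.toNat : Int) := by omega
  have hn1 : 1 ≤ size.toNat := by omega
  have hgl : size.toNat ≤ gp.length := by omega
  by_cases hdir : (direction == "vertical") = true
  · -- vertical
    simp only [hdir, if_true] at hcond
    have hline : lineOf size k direction gp
        = (gp.drop (gp.length - size.toNat)).map (fun row => PySem.List.pyGetD row k "") := by
      unfold lineOf
      rw [if_pos hdir, hsz, PySem.List.slice_from_neg_natCast _ _ (by omega)]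
      simp only [Int.toNat_natCast]
    have hlen : (lineOf size k direction gp).length = size.toNat := by
      rw [hline]
      simp only [List.length_map, List.length_drop]
      omega
    refine ⟨hlen, ?_⟩
    intro m hm
    have hrowlt : gp.length - (m + 1) < gp.length := by omega
    have hrowget : gp[gp.length - (m + 1)]? = some (gp[gp.length - (m + 1)]'hrowlt) :=
      List.getElem?_eq_getElem hrowlt
    have hdropget : (gp.drop (gp.length - size.toNat))[size.toNat - 1 - m]?
        = some (gp[gp.length - (m + 1)]'hrowlt) := by
      rw [List.getElem?_drop]
      have h2 : gp.length - size.toNat + (size.toNat - 1 - m) = gp.length - (m + 1) := by omega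
      rw [h2, hrowget]
    have hmem : gp[gp.length - (m + 1)]'hrowlt ∈ gp.drop (gp.length - size.toNat) :=
      List.mem_of_getElem? hdropget
    have hrlen : k.toNat < (gp[gp.length - (m + 1)]'hrowlt).length := by
      have := hcond _ hmem
      omega
    -- right-hand side
    have hR : (lineOf size k direction gp).reverse[m]?
        = some ((gp[gp.length - (m + 1)]'hrowlt)[k.toNat]'hrlen) := by
      rw [List.getElem?_reverse (by rw [hlen]; omega), hlen, hline, List.getElem?_map, hdropget]
      simp only [Option.map_some]
      rw [PySem.List.pyGetD_eq_getElem _ _ hk0 (by push_cast; omega)]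
    -- left-hand side
    rw [hR]
    unfold board_element
    rw [if_pos hdir]
    have h1 : -(1 + (m : Int)) = -(((m + 1 : Nat)) : Int) := by push_cast; ring
    rw [h1, PySem.List.pyGet?_neg_natCast _ _ (by omega) (by omega), hrowget]
    simp only [Option.bind_some]
    rw [PySem.List.pyGet?_of_nonneg _ hk0, List.getElem?_eq_getElem hrlen]
  · -- horizontal
    simp only [hdir, Bool.false_eq_true, if_false] at hcond
    have hkg : k.toNat < gp.length := by omega
    have hktn : k.toNat < size.toNat := by omega
    have hrow' : PySem.List.pyGetD gp k [] = gp[k.toNat]'hkg :=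
      PySem.List.pyGetD_eq_getElem _ _ hk0 (by push_cast; omega)
    have hmem : gp[k.toNat]'hkg ∈ gp.take size.toNat := by
      apply List.mem_of_getElem? (i := k.toNat)
      rw [List.getElem?_take, if_pos hktn]
      exact List.getElem?_eq_getElem hkg
    have hrlen : size.toNat ≤ (gp[k.toNat]'hkg).length := by
      have := hcond _ hmem
      omega
    have hline : lineOf size k direction gp
        = (gp[k.toNat]'hkg).drop ((gp[k.toNat]'hkg).length - size.toNat) := by
      unfold lineOf
      rw [if_neg hdir, hrow', hsz, PySem.List.slice_from_neg_natCast _ _ (by omega)]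
      simp only [Int.toNat_natCast]
    have hlen : (lineOf size k direction gp).length = size.toNat := by
      rw [hline]
      simp only [List.length_drop]
      omega
    refine ⟨hlen, ?_⟩
    intro m hm
    have hclt : (gp[k.toNat]'hkg).length - (m + 1) < (gp[k.toNat]'hkg).length := by omega
    -- right-hand side
    have hR : (lineOf size k direction gp).reverse[m]?
        = some ((gp[k.toNat]'hkg)[(gp[k.toNat]'hkg).length - (m + 1)]'hclt) := by
      rw [List.getElem?_reverse (by rw [hlen]; omega), hlen, hline,
        List.getElem?_drop]
      have h2 : (gp[k.toNat]'hkg).length - size.toNat + (size.toNat - 1 - m)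
          = (gp[k.toNat]'hkg).length - (m + 1) := by omega
      rw [h2]
      exact List.getElem?_eq_getElem hclt
    rw [hR]
    unfold board_element
    rw [if_neg hdir]
    rw [PySem.List.pyGet?_of_nonneg _ hk0, List.getElem?_eq_getElem hkg]
    simp only [Option.bind_some]
    have h1 : -(1 + (m : Int)) = -(((m + 1 : Nat)) : Int) := by push_cast; ring
    rw [h1, PySem.List.pyGet?_neg_natCast _ _ (by omega) (by omega)]
    exact List.getElem?_eq_getElem hclt

def rowScan (size : Int) (direction : String) (gp : List (List String)) (m : Nat) (row : List Int) : List Int :=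
  scanA ((lineOf size (m : Int) direction gp).reverse) 1 false row

lemma outerA_eq (size : Int) (direction : String) (gp : List (List String))
    (hPre : Pre_calc_header size direction gp) :
    ∀ (n k : Nat) (header : List (List Int)),
      (k : Int) + n = size → header.length = size.toNat →
      calcOuterA n (k : Int) size direction gp header
        = header.mapIdx (fun m row => if k ≤ m then rowScan size direction gp m row else row) := by
  intro n
  induction n with
  | zero =>
    intro k header hkn hlen
    show header = _
    apply List.ext_getElem
    · simp
    · intro m h1 h2
      rw [List.getElem_mapIdx]
      rw [if_neg (by omega)]
  | succ n ihn =>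
    intro k header hkn hlen
    have hks : (k : Int) < size := by omega
    have hklt : k < header.length := by omega
    show (if (k : Int) < size then _ else header) = _
    rw [if_pos hks]
    obtain ⟨hlinelen, hcells⟩ := cells_spec size (k : Int) direction gp hPre (by omega) hks
    have hcs : ((lineOf size (k : Int) direction gp).reverse).length = size.toNat := by
      simp [hlinelen]
    have hinner := innerA_eq size (k : Int) direction gp (by omega)
      ((lineOf size (k : Int) direction gp).reverse) 1 1 false header
      (by rw [hcs]; omega)
      (by intro m hm; exact hcells m (by rwa [hcs] at hm))
    rw [← hcs, hinner]
    have hpg : PySem.List.pyGet? header ((k : Nat) : Int) = some (header[k]'hklt) := by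
      rw [PySem.List.pyGet?_of_nonneg _ (by omega)]
      simp only [Int.toNat_natCast]
      exact List.getElem?_eq_getElem hklt
    rw [hpg]
    have hred : (match some (header[k]'hklt) with
        | some row => PySem.List.pySetD header ((k : Nat) : Int)
            (scanA ((lineOf size (k : Int) direction gp).reverse) 1 false row)
        | none => header)
        = PySem.List.pySetD header ((k : Nat) : Int)
            (scanA ((lineOf size (k : Int) direction gp).reverse) 1 false (header[k]'hklt)) := rfl
    rw [hred, PySem.List.pySetD_of_nonneg _ _ (by omega)]
    simp only [Int.toNat_natCast]
    have hcast : ((k : Int) + 1) = (((k + 1 : Nat)) : Int) := by push_cast; ring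
    rw [hcast, ihn (k + 1) _ (by push_cast; push_cast at hkn; omega) (by simp [hlen])]
    apply List.ext_getElem
    · simp
    · intro m h1 h2
      rw [List.getElem_mapIdx, List.getElem_mapIdx]
      simp only [List.getElem_set]
      by_cases hmk : m = k
      · subst hmk
        rw [if_pos (le_refl m), if_neg (by omega), if_pos (by omega)]
        rfl
      · rw [if_neg (Ne.symm hmk)]
        by_cases hle : k + 1 ≤ m
        · rw [if_pos hle, if_pos (by omega)]
        · rw [if_neg hle, if_neg (by omega)]

-- ===== VERDICT (by name: the statement is the Claim_ definition above) =====
lemma floordiv_width (size : Int) (hpos : 0 < size) :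
    PySem.Int.floordiv (size + 1) 2 = ((size.toNat + 1 : Nat) : Int) / 2 := by
  have h1 : size + 1 = ((size.toNat + 1 : Nat) : Int) := by omega
  rw [h1]
  have h2 := PySem.Int.floordiv_natCast (size.toNat + 1) 2
  exact_mod_cast h2

theorem calc_header_spec : Claim_equal_calc_header := by
  intro size direction gp _hDom hPre
  show calc_header size direction gp = calc_header_alt size direction gp
  by_cases hpos : 0 < size
  · have hn1 : 1 ≤ size.toNat := by omega
    have hw : PySem.Int.floordiv (size + 1) 2 = (((size.toNat + 1) / 2 : Nat) : Int) := by
      rw [floordiv_width size hpos]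
      exact_mod_cast rfl
    show calcOuterA size.toNat ((0 : Nat) : Int) size direction gp
        (List.replicate size.toNat (List.replicate (PySem.Int.floordiv (size + 1) 2).toNat 0))
      = calc_header_alt size direction gp
    rw [outerA_eq size direction gp hPre size.toNat 0 _ (by omega) (by simp)]
    unfold calc_header_alt
    rw [PySem.List.pyRange_one]
    apply List.ext_getElem
    · simp
    · intro m h1 h2
      rw [List.getElem_mapIdx]
      rw [if_pos (Nat.zero_le m)]
      rw [List.getElem_map, List.getElem_map, List.getElem_range]
      simp only [List.getElem_replicate, zero_add]
      have hm : m < size.toNat := by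
        simpa using h1
      have hm' : (m : Int) < size := by omega
      obtain ⟨hlinelen, _⟩ := cells_spec size (m : Int) direction gp hPre (by omega) hm'
      have hbound : (calcRuns (lineOf size (m : Int) direction gp)).length ≤ (size.toNat + 1) / 2 := by
        have hcl := calcRuns_len (lineOf size (m : Int) direction gp)
        rw [hlinelen] at hcl
        omega
      unfold rowScan
      have hwt : (PySem.Int.floordiv (size + 1) 2).toNat = (size.toNat + 1) / 2 := by
        rw [hw]
        omega
      have hs := (scan_spec ((lineOf size (m : Int) direction gp).reverse)).2
        ((PySem.Int.floordiv (size + 1) 2).toNat) ([] : List Int)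
        (by rw [List.reverse_reverse, hwt]; exact hbound)
      rw [List.reverse_reverse] at hs
      have hj : ((([] : List Int).length : Int) + 1) = 1 := by simp
      rw [hj, List.append_nil] at hs
      rw [hs, List.append_nil]
      have htn : (PySem.Int.floordiv (size + 1) 2
            - ((calcRuns (lineOf size (m : Int) direction gp)).length : Int)).toNat
          = (PySem.Int.floordiv (size + 1) 2).toNat
            - (calcRuns (lineOf size (m : Int) direction gp)).length := by
        rw [hw]
        omega
      rw [htn]
  · show calcOuterA size.toNat ((0 : Nat) : Int) size direction gp
        (List.replicate size.toNat (List.replicate (PySem.Int.floordiv (size + 1) 2).toNat 0))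
      = calc_header_alt size direction gp
    unfold calc_header_alt
    rw [show size.toNat = 0 from by omega, PySem.List.pyRange_one_eq_nil (by omega)]
    simp [calcOuterA]
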